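-- pv_equiv track=rewrite | github.com/Rec0440/binaris_solver | data/row.py | fill_in_row_by_010or101
-- ===== SOURCE A (Python) =====
-- def fill_in_row_by_010or101(m, x_int):
--     ''' Заповнює одиницею/нулем  проміжок 0*0/1*1 в рядочку '''
--     digit = '1*1'                                                 # шукаємо комбінацію 1*1 і вставляємо 0
--     index = m[x_int].find(digit)
--     while index >= 0:
--         m[x_int] = m[x_int][:index+1] + '0' + m[x_int][index+2:]      # якщо 1й або 3й доданки не існують, то доданок поретворюється у ''
--         index = m[x_int].find(digit, index+2)                         # спроба знайти наступне співпадіння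
--     digit = '0*0'                                                 # шукаємо комбінацію 0*0 і вставляємо 1
--     index = m[x_int].find(digit)
--     while index >= 0:
--         m[x_int] = m[x_int][:index+1] + '1' + m[x_int][index+2:]
--         index = m[x_int].find(digit, index+2)
--     return m
-- ===== SOURCE B (Python) =====
-- def fill_in_row_by_010or101(m, x_int):
--     ''' Same job, single left-to-right scan: every '*' whose original neighbours
--         are the same digit becomes the opposite digit.  Mutates m[x_int] like A. '''
--     s = m[x_int]
--     out = []
--     prev = None
--     n = len(s)
--     for i in range(n):
--         c = s[i]
--         nxt = s[i + 1] if i + 1 < n else None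
--         if c == '*' and prev is not None and prev == nxt and prev in '01':
--             out.append('1' if prev == '0' else '0')
--         else:
--             out.append(c)
--         prev = c
--     m[x_int] = ''.join(out)
--     return m
-- ===== Notes on version B (the rewrite author's own statement) =====
-- stated objective: simpler
-- what changed: A runs two find/splice while-loops (one per pattern '1*1' then '0*0'), repeatedly re-slicing the string; B is one left-to-right scan that flips each '*' whose original neighbours are the same digit, building the new string once.
import Mathlib
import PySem

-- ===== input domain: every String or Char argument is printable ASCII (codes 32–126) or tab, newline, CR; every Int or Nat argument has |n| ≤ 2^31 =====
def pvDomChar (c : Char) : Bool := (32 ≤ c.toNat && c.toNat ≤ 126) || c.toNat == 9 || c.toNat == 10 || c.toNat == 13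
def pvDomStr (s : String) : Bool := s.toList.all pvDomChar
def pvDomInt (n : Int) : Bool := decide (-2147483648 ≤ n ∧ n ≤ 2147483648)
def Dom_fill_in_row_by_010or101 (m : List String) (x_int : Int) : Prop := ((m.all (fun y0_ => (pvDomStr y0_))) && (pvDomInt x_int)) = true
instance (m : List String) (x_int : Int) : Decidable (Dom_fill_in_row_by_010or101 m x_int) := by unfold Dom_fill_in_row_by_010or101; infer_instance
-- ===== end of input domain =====

-- B replaces A's two find/splice while-loops by one left-to-right scan that flips each '*'
-- flanked by equal digits (objective: simpler).  Both A and B mutate m[x_int] in place the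
-- same way; the theorem below is about the returned list (which is that mutated list).

-- ===== PORT A =====
-- One of A's while-loops: `index` is the current result of .find; while it is ≥ 0,
-- splice the replacement character into m[x_int] and search again from index+2.
-- `fuel` only makes the recursion total; it never runs out (each found index grows by ≥ 2).
def pvALoop (digit : List Char) (x : Char) (x_int : Int) : Nat → List String → Int → List String
  | fuel, m, index =>
    if 0 ≤ index then
      match fuel with
      | 0 => m
      | fuel + 1 =>
        let s := (PySem.List.pyGetD m x_int "").toList
        let s' := PySem.Chars.slice s none (some (index + 1)) ++ [x] ++ PySem.Chars.slice s (some (index + 2)) none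
        let m' := PySem.List.pySetD m x_int (String.ofList s')
        pvALoop digit x x_int fuel m' (PySem.Chars.findFrom s' digit (index + 2) none)
    else m

def fill_in_row_by_010or101 (m : List String) (x_int : Int) : List String :=
  let s0 := (PySem.List.pyGetD m x_int "").toList
  let m1 := pvALoop ['1', '*', '1'] '0' x_int (s0.length + 1) m (PySem.Chars.find s0 ['1', '*', '1'])
  let s1 := (PySem.List.pyGetD m1 x_int "").toList
  pvALoop ['0', '*', '0'] '1' x_int (s1.length + 1) m1 (PySem.Chars.find s1 ['0', '*', '0'])

-- ===== PORT B =====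
-- Source B's single scan: one output char per input char, `prev`/`nxt` are the ORIGINAL neighbours.
def pvBScan (prev : Option Char) : List Char → List Char
  | [] => []
  | c :: rest =>
    (if c = '*' ∧ prev.isSome ∧ prev = rest.head? ∧ (prev = some '0' ∨ prev = some '1') then
       (if prev = some '0' then '1' else '0')
     else c) :: pvBScan (some c) rest

def fill_in_row_by_010or101_alt (m : List String) (x_int : Int) : List String :=
  PySem.List.pySetD m x_int
    (String.ofList (pvBScan none (PySem.List.pyGetD m x_int "").toList))

-- ===== PRECONDITION & SPEC =====
-- A raises IndexError iff x_int is out of range for m (Python negative indexing allowed).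
def Pre_fill_in_row_by_010or101 (m : List String) (x_int : Int) : Prop :=
  PySem.Raise.InRange m.length x_int
instance (m : List String) (x_int : Int) : Decidable (Pre_fill_in_row_by_010or101 m x_int) := by
  unfold Pre_fill_in_row_by_010or101; infer_instance

def pvWitness_fill_in_row_by_010or101 : List String × Int := (["1*1*0*0"], 0)

def Spec_fill_in_row_by_010or101 (m : List String) (x_int : Int) (out : List String) : Prop := out = fill_in_row_by_010or101_alt m x_int
instance (m : List String) (x_int : Int) (out : List String) : Decidable (Spec_fill_in_row_by_010or101 m x_int out) := by unfold Spec_fill_in_row_by_010or101; infer_instance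

-- ===== CLAIM (what is proved, stated in full; the proofs are below) =====
def Claim_equal_fill_in_row_by_010or101 : Prop := ∀ (m : List String) (x_int : Int), Dom_fill_in_row_by_010or101 m x_int → Pre_fill_in_row_by_010or101 m x_int → Spec_fill_in_row_by_010or101 m x_int (fill_in_row_by_010or101 m x_int)

-- ===== LEMMAS AND PROOFS =====

-- A's one pass for the pattern [d,'*',d] as a structural recursion (proof-side model).
def pvPass (d x : Char) : List Char → List Char
  | a :: b :: c :: r =>
    if a = d ∧ b = '*' ∧ c = d then a :: x :: pvPass d x (c :: r)
    else a :: pvPass d x (b :: c :: r)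
  | s => s
termination_by s => s.length

-- One pass in prev-passing form.
def pvScanD (d x : Char) (p : Option Char) : List Char → List Char
  | [] => []
  | b :: rest => (if b = '*' ∧ p = some d ∧ rest.head? = some d then x else b) :: pvScanD d x (some b) rest


lemma pvPass_nil (d x : Char) : pvPass d x [] = [] := by simp [pvPass]
lemma pvPass_one (d x a : Char) : pvPass d x [a] = [a] := by simp [pvPass]
lemma pvPass_two (d x a b : Char) : pvPass d x [a, b] = [a, b] := by simp [pvPass]
lemma pvPass_short (d x : Char) (s : List Char) (h : s.length < 3) : pvPass d x s = s := by
  match s, h with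
  | [], _ => exact pvPass_nil d x
  | [a], _ => exact pvPass_one d x a
  | [a, b], _ => exact pvPass_two d x a b

lemma pvPass_copy (d x : Char) (j : Nat) :
    ∀ (s : List Char), (∀ i < j, ¬ [d, '*', d] <+: s.drop i) →
    pvPass d x s = s.take j ++ pvPass d x (s.drop j) := by
  induction j with
  | zero => intro s _; simp
  | succ j ih =>
    intro s h
    match s with
    | [] => simp
    | [a] =>
      rcases j with _ | j <;> simp [pvPass_short]
    | [a, b] =>
      rcases j with _ | j
      · simp [pvPass_two, pvPass_one]
      · have hd : ([a,b] : List Char).drop (j+2) = [] := by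
          apply List.drop_eq_nil_of_le; simp
        have ht : ([a,b] : List Char).take (j+2) = [a,b] := by
          apply List.take_of_length_le; simp
        rw [hd, ht, pvPass_two, pvPass_nil, List.append_nil]
    | a :: b :: c :: r =>
      have h0 := h 0 (by omega)
      simp only [List.drop_zero] at h0
      have hcond : ¬ (a = d ∧ b = '*' ∧ c = d) := by
        intro ⟨h1, h2, h3⟩
        exact h0 (by subst h1 h2 h3; exact ⟨r, rfl⟩)
      rw [pvPass, if_neg hcond,
        ih (b :: c :: r) (fun i hi => by simpa using h (i+1) (by omega))]
      simp

lemma pvIdx_spec (n : Nat) (i : Int) (h : PySem.Raise.InRange n i) :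
    ∃ k, PySem.List.pyIdx? n i = some k ∧ k < n := by
  unfold PySem.Raise.InRange at h
  unfold PySem.List.pyIdx?
  split_ifs with h1 h2 h3
  · exact ⟨i.toNat, rfl, by omega⟩
  · omega
  · exact ⟨n - (-i).toNat, rfl, by omega⟩
  · omega
lemma pvLen_setD {α : Type} (m : List α) (i : Int) (v : α) :
    (PySem.List.pySetD m i v).length = m.length := by
  unfold PySem.List.pySetD PySem.List.pySet?
  cases PySem.List.pyIdx? m.length i <;> simp
lemma pvGetD_setD {α : Type} (m : List α) (i : Int) (v d : α) (h : PySem.Raise.InRange m.length i) :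
    PySem.List.pyGetD (PySem.List.pySetD m i v) i d = v := by
  obtain ⟨k, hk, hkn⟩ := pvIdx_spec m.length i h
  unfold PySem.List.pyGetD PySem.List.pyGet? PySem.List.pySetD PySem.List.pySet?
  simp [hk, hkn]
lemma pvSetD_setD {α : Type} (m : List α) (i : Int) (v w : α) (h : PySem.Raise.InRange m.length i) :
    PySem.List.pySetD (PySem.List.pySetD m i v) i w = PySem.List.pySetD m i w := by
  obtain ⟨k, hk, hkn⟩ := pvIdx_spec m.length i h
  unfold PySem.List.pySetD PySem.List.pySet?
  simp [hk, List.set_set]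
lemma pvSetD_getD_self {α : Type} (m : List α) (i : Int) (d : α) (h : PySem.Raise.InRange m.length i) :
    PySem.List.pySetD m i (PySem.List.pyGetD m i d) = m := by
  obtain ⟨k, hk, hkn⟩ := pvIdx_spec m.length i h
  unfold PySem.List.pySetD PySem.List.pySet? PySem.List.pyGetD PySem.List.pyGet?
  simp [hk, List.getElem?_eq_getElem hkn, List.set_getElem_self]

lemma pvPass_eq_scanD (d x : Char) (hd : d ≠ '*') :
    ∀ (s : List Char) (p : Option Char),
      (∀ b t, s = b :: t → b = '*' → ¬ (p = some d ∧ t.head? = some d)) →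
      pvPass d x s = pvScanD d x p s := by
  suffices main : ∀ (n : Nat) (s : List Char), s.length ≤ n → ∀ (p : Option Char),
      (∀ b t, s = b :: t → b = '*' → ¬ (p = some d ∧ t.head? = some d)) →
      pvPass d x s = pvScanD d x p s by
    intro s p h; exact main s.length s le_rfl p h
  intro n
  induction n with
  | zero =>
    intro s hs p h
    have hnil : s = [] := List.length_eq_zero_iff.mp (by omega)
    subst hnil; simp [pvPass_nil, pvScanD]
  | succ n ih =>
  intro s hs p h
  match s with
  | [] => simp [pvPass_nil, pvScanD]
  | [a] =>
    rw [pvPass_one, pvScanD, pvScanD, if_neg (by simp)]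
  | [a, b] =>
    rw [pvPass_two]
    rw [pvScanD, pvScanD, pvScanD]
    have h1 : ¬ (a = '*' ∧ p = some d ∧ ([b] : List Char).head? = some d) := by
      intro ⟨ha, hb⟩; exact h a [b] rfl ha hb
    have h2 : ¬ (b = '*' ∧ some a = some d ∧ ([] : List Char).head? = some d) := by simp
    rw [if_neg h1, if_neg h2]
  | a :: b :: c :: r =>
    by_cases hc : a = d ∧ b = '*' ∧ c = d
    · obtain ⟨ha, hb, hcc⟩ := hc
      rw [pvPass, if_pos ⟨ha, hb, hcc⟩]
      rw [pvScanD, pvScanD]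
      have h1 : ¬ (a = '*' ∧ p = some d ∧ (b :: c :: r).head? = some d) := by
        intro ⟨ha', hp⟩; exact h a (b :: c :: r) rfl ha' hp
      rw [if_neg h1, if_pos (by simp [hb, ha, hcc])]
      congr 1
      congr 1
      rw [ih (c :: r) (by simp at hs ⊢; omega) (some b)]
      intro b' t' he hb'
      injection he with he1 he2
      intro ⟨hpd, _⟩
      rw [hb] at hpd
      exact hd (by injection hpd with q; rw [q]) |>.elim
      -- hmm direction
    · rw [pvPass, if_neg hc]
      rw [pvScanD]
      have h1 : ¬ (a = '*' ∧ p = some d ∧ (b :: c :: r).head? = some d) := by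
        intro ⟨ha', hp⟩; exact h a (b :: c :: r) rfl ha' hp
      rw [if_neg h1]
      congr 1
      rw [ih (b :: c :: r) (by simp at hs ⊢; omega) (some a)]
      intro b' t' he hb'
      injection he with he1 he2
      subst he1 he2
      intro ⟨hpd, hh⟩
      injection hpd with hpd
      simp at hh
      exact hc ⟨hpd, hb', hh⟩

lemma pvScanD_head (d x : Char) (p : Option Char) (s : List Char) (hp : p ≠ some d) :
    (pvScanD d x p s).head? = s.head? := by
  match s with
  | [] => rfl
  | b :: rest => simp [pvScanD, hp]

lemma pvComp : ∀ (s : List Char) (p q : Option Char), (s.head? = some '*' → q = p) →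
    pvScanD '0' '1' q (pvScanD '1' '0' p s) = pvBScan p s := by
  intro s
  induction s with
  | nil => intro p q h; simp [pvScanD, pvBScan]
  | cons b rest ih =>
    intro p q h
    rw [pvScanD]
    by_cases hb : b = '*'
    · -- q = p
      have hq : q = p := h (by simp [hb])
      rw [hq]
      by_cases h1 : p = some '1' ∧ rest.head? = some '1'
      · -- pass1 fires: output '0'
        rw [if_pos ⟨hb, h1.1, h1.2⟩]
        rw [pvScanD, if_neg (by simp)]
        rw [pvBScan, if_pos ⟨hb, by simp [h1.1], by simp [h1.1, h1.2], Or.inr h1.1⟩]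
        rw [if_neg (by simp [h1.1])]
        congr 1
        apply ih
        intro hh
        exact absurd (h1.2.symm.trans hh) (by decide)
      · rw [if_neg (by intro ⟨_, a, c⟩; exact h1 ⟨a, c⟩)]
        rw [pvScanD]
        have hhead : (pvScanD '1' '0' (some b) rest).head? = rest.head? :=
          pvScanD_head _ _ _ _ (by simp [hb])
        by_cases h0 : p = some '0' ∧ rest.head? = some '0'
        · rw [if_pos ⟨hb, h0.1, by rw [hhead]; exact h0.2⟩]
          rw [pvBScan, if_pos ⟨hb, by simp [h0.1], by simp [h0.1, h0.2], Or.inl h0.1⟩]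
          rw [if_pos h0.1]
          congr 1
          apply ih
          intro hh
          rw [h0.2] at hh
        · rw [if_neg (by intro ⟨_, a, c⟩; rw [hhead] at c; exact h0 ⟨a, c⟩)]
          rw [pvBScan]
          have hB : ¬ (b = '*' ∧ p.isSome ∧ p = rest.head? ∧ (p = some '0' ∨ p = some '1')) := by
            intro ⟨_, hsome, hpn, hor⟩
            rcases hor with h' | h'
            · exact h0 ⟨h', by rw [← hpn, h']⟩
            · exact h1 ⟨h', by rw [← hpn, h']⟩
          rw [if_neg hB]
          congr 1
          apply ih
          intro _; rfl
    · rw [if_neg (by intro ⟨a, _⟩; exact hb a)]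
      rw [pvScanD, if_neg (by intro ⟨a, _⟩; exact hb a)]
      rw [pvBScan, if_neg (by intro ⟨a, _⟩; exact hb a)]
      congr 1
      apply ih
      intro hh
      rfl


lemma pvTake_app {α : Type} (t r : List α) (n : Nat) :
    (t ++ r).take (t.length + n) = t ++ r.take n := by
  simp [List.take_append]

lemma pvDrop_app {α : Type} (t r : List α) (n : Nat) :
    (t ++ r).drop (t.length + n) = r.drop n := by
  simp [List.drop_append]

-- the loop invariant: the processed prefix t stays, the loop runs over the untouched suffix r
lemma pvALoop_eq (d x : Char) (x_int : Int) (m : List String)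
    (hm : PySem.Raise.InRange m.length x_int) :
    ∀ (fuel : Nat) (t r : List Char), r.length ≤ fuel →
      pvALoop [d, '*', d] x x_int fuel (PySem.List.pySetD m x_int (String.ofList (t ++ r)))
        (if PySem.Chars.find r [d, '*', d] = -1 then -1 else (t.length : Int) + PySem.Chars.find r [d, '*', d])
      = PySem.List.pySetD m x_int (String.ofList (t ++ pvPass d x r)) := by
  intro fuel
  induction fuel with
  | zero =>
    intro t r hr
    have hrn : r = [] := List.length_eq_zero_iff.mp (by omega)
    subst hrn
    have hni : ¬ ([d, '*', d] : List Char) <:+: ([] : List Char) := by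
      intro hinf; have := hinf.length_le; simp at this
    rw [if_pos ((PySem.Chars.find_eq_neg_one_iff _ _).mpr hni)]
    rw [pvALoop, if_neg (by omega), pvPass_nil]
  | succ f ih =>
    intro t r hr
    by_cases hf : PySem.Chars.find r [d, '*', d] = -1
    · rw [if_pos hf]
      have hni : ¬ ([d, '*', d] : List Char) <:+: r := (PySem.Chars.find_eq_neg_one_iff _ _).mp hf
      have hid : pvPass d x r = r := by
        rw [pvPass_copy d x r.length r
          (fun i _ hpre => hni (hpre.isInfix.trans (List.drop_suffix i r).isInfix))]
        simp [pvPass_nil]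
      rw [pvALoop, if_neg (by omega), hid]
    · have hge : 0 ≤ PySem.Chars.find r [d, '*', d] := by
        have := PySem.Chars.neg_one_le_find r [d, '*', d]; omega
      obtain ⟨hpre, hmin⟩ := PySem.Chars.find_spec (s := r) (sub := [d, '*', d]) hge
      set j := (PySem.Chars.find r [d, '*', d]).toNat with hj
      have hfj : PySem.Chars.find r [d, '*', d] = (j : Int) := (Int.toNat_of_nonneg hge).symm
      obtain ⟨u, hu⟩ := hpre
      have hj3 : j + 3 ≤ r.length := by
        have h1 := congrArg List.length hu
        have h2 : (r.drop j).length = r.length - j := List.length_drop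
        have h3 : j ≤ r.length := by
          by_contra hc
          have : r.drop j = [] := List.drop_eq_nil_of_le (by omega)
          rw [this] at hu; simp at hu
        simp at h1; omega
      rw [if_neg hf, pvALoop, if_pos (by rw [hfj]; omega)]
      -- the spliced string
      have hs0 : (PySem.List.pyGetD (PySem.List.pySetD m x_int (String.ofList (t ++ r))) x_int "").toList
          = t ++ r := by rw [pvGetD_setD m x_int _ _ hm, String.toList_ofList]
      simp only [hs0]
      have hcast1 : (t.length : Int) + PySem.Chars.find r [d, '*', d] + 1 = ((t.length + j + 1 : Nat) : Int) := by
        rw [hfj]; push_cast; ring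
      have hcast2 : (t.length : Int) + PySem.Chars.find r [d, '*', d] + 2 = ((t.length + j + 2 : Nat) : Int) := by
        rw [hfj]; push_cast; ring
      have hsl1 : PySem.Chars.slice (t ++ r) none (some ((t.length : Int) + PySem.Chars.find r [d, '*', d] + 1))
          = t ++ r.take (j + 1) := by
        rw [hcast1, PySem.Chars.slice_eq_listSlice, PySem.List.slice_to_natCast]
        have : t.length + j + 1 = t.length + (j + 1) := by omega
        rw [this, pvTake_app]
      have hsl2 : PySem.Chars.slice (t ++ r) (some ((t.length : Int) + PySem.Chars.find r [d, '*', d] + 2)) none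
          = r.drop (j + 2) := by
        rw [hcast2, PySem.Chars.slice_eq_listSlice, PySem.List.slice_from_natCast]
        have : t.length + j + 2 = t.length + (j + 2) := by omega
        rw [this, pvDrop_app]
      simp only [hsl1, hsl2]
      -- regroup the spliced string as t' ++ r'
      have hregroup : t ++ r.take (j + 1) ++ [x] ++ r.drop (j + 2)
          = (t ++ r.take (j + 1) ++ [x]) ++ r.drop (j + 2) := by simp [List.append_assoc]
      set t' : List Char := t ++ r.take (j + 1) ++ [x] with ht'
      set r' : List Char := r.drop (j + 2) with hr'
      have hlt' : t'.length = t.length + j + 2 := by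
        rw [ht']; simp [List.length_take]; omega
      -- the next findFrom
      have hff : PySem.Chars.findFrom (t ++ r.take (j + 1) ++ [x] ++ r.drop (j + 2)) [d, '*', d]
            ((t.length : Int) + PySem.Chars.find r [d, '*', d] + 2) none
          = if PySem.Chars.find r' [d, '*', d] = -1 then -1 else ((t'.length : Int) + PySem.Chars.find r' [d, '*', d]) := by
        rw [hcast2]
        have hk : t.length + j + 2 ≤ (t ++ r.take (j + 1) ++ [x] ++ r.drop (j + 2)).length := by
          simp [List.length_take]; omega
        rw [PySem.Chars.findFrom_natCast _ _ _ hk]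
        have hdrop : (t ++ r.take (j + 1) ++ [x] ++ r.drop (j + 2)).drop (t.length + j + 2) = r' := by
          rw [hregroup, ← hlt']
          have : t'.length = t'.length + 0 := by omega
          rw [this, pvDrop_app]; simp
        rw [hdrop, hlt']
      rw [hff, hregroup]
      have hsetset : PySem.List.pySetD (PySem.List.pySetD m x_int (String.ofList (t ++ r))) x_int
            (String.ofList (t' ++ r')) = PySem.List.pySetD m x_int (String.ofList (t' ++ r')) :=
        pvSetD_setD m x_int _ _ hm
      rw [hsetset]
      rw [ih t' r' (by rw [hr']; simp; omega)]
      -- finally: t' ++ pvPass r' = t ++ pvPass r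
      have hpass : pvPass d x r = r.take j ++ (d :: x :: pvPass d x r') := by
        have hu' : List.drop j r = d :: '*' :: d :: u := by rw [← hu]; rfl
        rw [pvPass_copy d x j r hmin, hu']
        rw [pvPass, if_pos ⟨rfl, rfl, rfl⟩]
        congr 2
        have : d :: u = r.drop (j + 2) := by
          have h2 : (r.drop j).drop 2 = r.drop (j + 2) := by rw [List.drop_drop]
          rw [← h2, ← hu]; rfl
        rw [this]
      have htake : r.take (j + 1) = r.take j ++ [d] := by
        rw [List.take_add_one]
        have : r[j]? = some d := by
          have hgd := List.getElem?_drop (xs := r) (i := j) (j := 0)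
          rw [← hu] at hgd; simpa using hgd.symm
        rw [this]; rfl
      rw [hpass, ht', htake]
      simp [List.append_assoc]
lemma pvPass_both (s0 : List Char) :
    pvPass '0' '1' (pvPass '1' '0' s0) = pvBScan none s0 := by
  rw [pvPass_eq_scanD '1' '0' (by decide) s0 none (by intro b t _ _ hc; simp at hc)]
  rw [pvPass_eq_scanD '0' '1' (by decide) _ none (by intro b t _ _ hc; simp at hc)]
  exact pvComp s0 none none (fun _ => rfl)

-- ===== VERDICT (by name: the statement is the Claim_ definition above) =====
theorem fill_in_row_by_010or101_spec : Claim_equal_fill_in_row_by_010or101 := by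
  intro m x_int _ hpre
  unfold Pre_fill_in_row_by_010or101 at hpre
  unfold Spec_fill_in_row_by_010or101 fill_in_row_by_010or101 fill_in_row_by_010or101_alt
  dsimp only
  set s0 := (PySem.List.pyGetD m x_int "").toList with hs0
  have hofl : String.ofList s0 = PySem.List.pyGetD m x_int "" := by
    rw [hs0, String.ofList_toList]
  have hstate : PySem.List.pySetD m x_int (String.ofList ([] ++ s0)) = m := by
    rw [List.nil_append, hofl]; exact pvSetD_getD_self m x_int "" hpre
  have hidx : ∀ (dg : List Char), (if PySem.Chars.find s0 dg = -1 then (-1 : Int)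
      else ((([] : List Char)).length : Int) + PySem.Chars.find s0 dg) = PySem.Chars.find s0 dg := by
    intro dg; by_cases h : PySem.Chars.find s0 dg = -1 <;> simp [h]
  have h1 : pvALoop ['1', '*', '1'] '0' x_int (s0.length + 1) m (PySem.Chars.find s0 ['1', '*', '1'])
      = PySem.List.pySetD m x_int (String.ofList (pvPass '1' '0' s0)) := by
    conv_lhs => rw [← hstate, ← hidx ['1', '*', '1']]
    simpa using pvALoop_eq '1' '0' x_int m hpre (s0.length + 1) [] s0 (by omega)
  rw [h1]
  have hpre1 : PySem.Raise.InRange (PySem.List.pySetD m x_int (String.ofList (pvPass '1' '0' s0))).length x_int := by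
    rw [pvLen_setD]; exact hpre
  set m1 := PySem.List.pySetD m x_int (String.ofList (pvPass '1' '0' s0)) with hm1
  have hget1 : (PySem.List.pyGetD m1 x_int "").toList = pvPass '1' '0' s0 := by
    rw [hm1, pvGetD_setD m x_int _ _ hpre, String.toList_ofList]
  rw [hget1]
  set s1 := pvPass '1' '0' s0 with hs1
  have hofl1 : String.ofList s1 = PySem.List.pyGetD m1 x_int "" := by
    rw [← hget1, String.ofList_toList]
  have hstate1 : PySem.List.pySetD m1 x_int (String.ofList ([] ++ s1)) = m1 := by
    rw [List.nil_append, hofl1]; exact pvSetD_getD_self m1 x_int "" hpre1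
  have hidx1 : ∀ (dg : List Char), (if PySem.Chars.find s1 dg = -1 then (-1 : Int)
      else ((([] : List Char)).length : Int) + PySem.Chars.find s1 dg) = PySem.Chars.find s1 dg := by
    intro dg; by_cases h : PySem.Chars.find s1 dg = -1 <;> simp [h]
  have h2 : pvALoop ['0', '*', '0'] '1' x_int (s1.length + 1) m1 (PySem.Chars.find s1 ['0', '*', '0'])
      = PySem.List.pySetD m1 x_int (String.ofList (pvPass '0' '1' s1)) := by
    conv_lhs => rw [← hstate1, ← hidx1 ['0', '*', '0']]
    simpa using pvALoop_eq '0' '1' x_int m1 hpre1 (s1.length + 1) [] s1 (by omega)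
  rw [h2, hm1, pvSetD_setD m x_int _ _ hpre, hs1, pvPass_both]
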